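-- pv_equiv track=rewrite | github.com/dinesh9110/FLAMES-game | FLAMES game.py | remove_common_letters
-- ===== SOURCE A (Python) =====
-- def remove_common_letters(name1, name2):
--     # Convert names to lowercase
--     name1 = name1.lower().strip()
--     name2 = name2.lower().strip()
--
--     # Remove common letters
--     for letter in name1:
--         if letter in name2:
--             name1 = name1.replace(letter, '', 1)
--             name2 = name2.replace(letter, '', 1)
--
--     # Return the total length of remaining letters
--     return len(name1 + name2)
-- ===== SOURCE B (Python) =====
-- def remove_common_letters(name1, name2):
--     s1 = name1.lower().strip()
--     s2 = name2.lower().strip()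
--     # multiset of s2's characters, built once
--     counts = {}
--     for c in s2:
--         counts[c] = counts.get(c, 0) + 1
--     matches = 0
--     for c in s1:
--         if counts.get(c, 0) > 0:
--             counts[c] = counts.get(c, 0) - 1
--             matches += 1
--     return len(s1) + len(s2) - 2 * matches
-- ===== Notes on version B (the rewrite author's own statement) =====
-- stated objective: faster
-- what changed: Replaces the nested scan (membership test plus two one-occurrence string replaces per character) with a single counter dictionary built from name2 and one pass over name1, returning len1+len2-2*matches in closed form.
import Mathlib
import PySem

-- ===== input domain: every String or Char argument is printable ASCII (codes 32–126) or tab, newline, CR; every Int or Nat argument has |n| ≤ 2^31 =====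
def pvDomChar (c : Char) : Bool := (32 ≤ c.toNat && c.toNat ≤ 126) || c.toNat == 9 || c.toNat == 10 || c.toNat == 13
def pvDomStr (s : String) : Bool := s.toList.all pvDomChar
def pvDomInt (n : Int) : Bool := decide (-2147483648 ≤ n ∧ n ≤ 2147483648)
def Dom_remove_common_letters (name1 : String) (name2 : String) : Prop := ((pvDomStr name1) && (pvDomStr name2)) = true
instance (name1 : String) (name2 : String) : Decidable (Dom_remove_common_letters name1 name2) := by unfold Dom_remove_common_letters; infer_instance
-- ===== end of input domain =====

-- B replaces A's nested scan (per-character membership test + one-occurrence replaces)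
-- with a counter dictionary over name2 and a single pass over name1 (faster in a timing run).


-- ===== PORT A =====
-- the for-loop over the (lowercased, stripped) original name1, state = current (name1, name2);
-- `letter in name2` on a single char is exactly list membership, and
-- `s.replace(letter, '', 1)` on a single char removes exactly the first occurrence = List.erase.
def pvLoopA : List Char → List Char → List Char → (List Char × List Char)
  | [], n1, n2 => (n1, n2)
  | c :: rest, n1, n2 =>
      if c ∈ n2 then pvLoopA rest (n1.erase c) (n2.erase c)
      else pvLoopA rest n1 n2

def remove_common_letters (name1 : String) (name2 : String) : Int :=
  let s1 := PySem.Chars.strip (PySem.Chars.lower name1.toList)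
  let s2 := PySem.Chars.strip (PySem.Chars.lower name2.toList)
  let r := pvLoopA s1 s1 s2
  ((r.1 ++ r.2).length : Int)

-- ===== PORT B =====
def remove_common_letters_alt (name1 : String) (name2 : String) : Int :=
  let s1 := PySem.Chars.strip (PySem.Chars.lower name1.toList)
  let s2 := PySem.Chars.strip (PySem.Chars.lower name2.toList)
  let counts := s2.foldl (fun d c => d.insert c (d.getD c 0 + 1)) PySem.Dict.empty
  let r := s1.foldl
    (fun (p : PySem.Dict Char Int × Int) c =>
      if p.1.getD c 0 > 0 then (p.1.insert c (p.1.getD c 0 - 1), p.2 + 1) else p)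
    (counts, 0)
  (s1.length : Int) + (s2.length : Int) - 2 * r.2

-- ===== PRECONDITION & SPEC =====
def Spec_remove_common_letters (name1 : String) (name2 : String) (out : Int) : Prop := out = remove_common_letters_alt name1 name2
instance (name1 : String) (name2 : String) (out : Int) : Decidable (Spec_remove_common_letters name1 name2 out) := by unfold Spec_remove_common_letters; infer_instance

-- ===== CLAIM (what is proved, stated in full; the proofs are below) =====
def Claim_equal_remove_common_letters : Prop := ∀ (name1 : String) (name2 : String), Dom_remove_common_letters name1 name2 → Spec_remove_common_letters name1 name2 (remove_common_letters name1 name2)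

-- ===== LEMMAS AND PROOFS =====

-- Core invariant: as long as the counter dict mirrors the multiset of the current name2
-- and every character still to be processed occurs in the current name1 often enough,
-- A's remaining lengths and B's match counter move in lockstep.
theorem pvLoop_agree (l : List Char) :
    ∀ (n1 n2 : List Char) (d : PySem.Dict Char Int) (m : Int),
    (∀ c, d.getD c 0 = (n2.count c : Int)) →
    (∀ c, l.count c ≤ n1.count c) →
    (((pvLoopA l n1 n2).1.length : Int) + ((pvLoopA l n1 n2).2.length : Int))
      + 2 * (l.foldl
          (fun (p : PySem.Dict Char Int × Int) c =>
            if p.1.getD c 0 > 0 then (p.1.insert c (p.1.getD c 0 - 1), p.2 + 1) else p)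
          (d, m)).2
      = (n1.length : Int) + (n2.length : Int) + 2 * m := by
  induction l with
  | nil => intro n1 n2 d m _ _; simp [pvLoopA]
  | cons c rest ih =>
    intro n1 n2 d m hd h1
    have hcnt1 : 1 ≤ n1.count c := le_trans (by simp) (h1 c)
    have hmem1 : c ∈ n1 := List.count_pos_iff.mp (by omega)
    by_cases hc : c ∈ n2
    · have hpos : (0 : Int) < d.getD c 0 := by
        rw [hd c]; exact_mod_cast List.count_pos_iff.mpr hc
      simp only [pvLoopA, List.foldl_cons, if_pos hc, if_pos hpos]
      rw [ih (n1.erase c) (n2.erase c) (d.insert c (d.getD c 0 - 1)) (m + 1)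
          (by
            intro c'
            rw [PySem.Dict.getD_insert]
            by_cases hcc : c' = c
            · rw [if_pos hcc, hcc, hd c, List.count_erase_self]
              have h2 : 1 ≤ n2.count c := List.count_pos_iff.mpr hc
              omega
            · rw [if_neg hcc, hd c', List.count_erase_of_ne hcc])
          (by
            intro c'
            have h := h1 c'
            simp only [List.count_cons] at h
            rw [List.count_erase]
            by_cases hcc : c' = c <;> simp [hcc] at h ⊢ <;> omega)]
      have e1 : (n1.erase c).length = n1.length - 1 := List.length_erase_of_mem hmem1
      have e2 : (n2.erase c).length = n2.length - 1 := List.length_erase_of_mem hc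
      have l1 : 1 ≤ n1.length := List.length_pos_of_mem hmem1
      have l2 : 1 ≤ n2.length := List.length_pos_of_mem hc
      rw [e1, e2]; push_cast [Nat.cast_sub l1, Nat.cast_sub l2]; ring
    · have hz : d.getD c 0 = 0 := by
        rw [hd c, List.count_eq_zero_of_not_mem hc]; simp
      simp only [pvLoopA, List.foldl_cons, if_neg hc, hz]
      norm_num
      exact ih n1 n2 d m hd (by
        intro c'
        have h := h1 c'
        simp only [List.count_cons] at h
        by_cases hcc : c' = c <;> simp [hcc] at h ⊢ <;> omega)

-- ===== VERDICT (by name: the statement is the Claim_ definition above) =====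
theorem remove_common_letters_spec : Claim_equal_remove_common_letters := by
  intro name1 name2 _
  unfold Spec_remove_common_letters remove_common_letters remove_common_letters_alt
  set s1 := PySem.Chars.strip (PySem.Chars.lower name1.toList) with hs1
  set s2 := PySem.Chars.strip (PySem.Chars.lower name2.toList) with hs2
  have hd : ∀ c, (s2.foldl (fun d c => d.insert c (d.getD c 0 + 1)) PySem.Dict.empty).getD c 0
      = (s2.count c : Int) := by
    intro c
    rw [PySem.Dict.getD_foldl_insert_add_one]
    simp [PySem.Dict.getD, PySem.Dict.get?, PySem.Dict.empty]
  have key := pvLoop_agree s1 s1 s2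
    (s2.foldl (fun d c => d.insert c (d.getD c 0 + 1)) PySem.Dict.empty) 0 hd
    (fun c => le_refl _)
  simp only [List.length_append] at *
  push_cast at key ⊢
  omega
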